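-- pv_equiv track=rewrite | github.com/thealper2/codewars-solutions | 7-kyu/coding_3_min_remove_scrws_1.py | sc
-- ===== SOURCE A (Python) =====
-- def sc(s):
--     current = s[0]
--     s = s[1:]
--     n = len(s)
--     total_time = 1
--
--     for i in range(n):
--         total_time += 1
--         if current != s[i]:
--             total_time += 5
--             current = s[i]
--
--         total_time += 1
--
--     return total_time
-- ===== SOURCE B (Python) =====
-- def sc(s):
--     # View the screw sequence as maximal runs of equal colors: each char costs 2
--     # (except the first, cost 1) and each boundary between runs costs 5 extra.
--     n = len(s)
--     runs = 0
--     i = 0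
--     while i < n:
--         runs += 1
--         j = i
--         while j < n and s[j] == s[i]:
--             j += 1
--         i = j
--     return 2 * n - 1 + 5 * (runs - 1)
-- ===== Notes on version B (the rewrite author's own statement) =====
-- stated objective: alternative
-- what changed: B views the string as maximal runs of equal colors: a two-pointer scan that skips each whole run counts the runs, and the answer is the closed form 2*n - 1 + 5*(runs - 1), instead of A's per-character walk carrying a current color and an accumulating time; Pre_ excludes the empty string, on which A raises IndexError.
import Mathlib
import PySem

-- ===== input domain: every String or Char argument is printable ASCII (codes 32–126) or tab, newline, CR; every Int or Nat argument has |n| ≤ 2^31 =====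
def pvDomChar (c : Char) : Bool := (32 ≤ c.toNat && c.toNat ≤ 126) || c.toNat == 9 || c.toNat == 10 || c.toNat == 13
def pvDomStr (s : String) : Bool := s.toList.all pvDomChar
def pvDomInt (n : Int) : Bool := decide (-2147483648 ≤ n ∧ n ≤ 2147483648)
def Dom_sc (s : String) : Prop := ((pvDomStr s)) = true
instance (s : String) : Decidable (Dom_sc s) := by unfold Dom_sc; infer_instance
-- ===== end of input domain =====

-- B counts maximal runs of equal colors (two-pointer run-skipping scan) and uses the closed form
-- 2*n - 1 + 5*(runs - 1), instead of A's per-character stateful accumulation (objective: alternative).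

-- ===== PORT A =====
-- A: current = s[0]; walk s[1:] adding 2 per char plus 5 on each color change, starting from total 1.
def scStep (st : Char × Int) (ch : Char) : Char × Int :=
  let t := st.2 + 1
  let (cur, t) := if st.1 ≠ ch then (ch, t + 5) else (st.1, t)
  (cur, t + 1)

def sc (s : String) : Int :=
  match PySem.Str.pyGet? s 0 with
  | none => 0   -- s[0] raises IndexError in Python; excluded by Pre_sc
  | some c0 => ((s.toList.drop 1).foldl scStep (c0, 1)).2

-- ===== PORT B =====
-- inner while loop of Source B: skip the whole maximal run of the head color, count one run, repeat
def runCount : List Char → Nat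
  | [] => 0
  | c :: rest => 1 + runCount (rest.dropWhile (· == c))
termination_by l => l.length
decreasing_by
  simpa using Nat.lt_succ_of_le (List.length_dropWhile_le _ _)

def sc_alt (s : String) : Int :=
  let n : Int := (s.toList.length : Nat)
  2 * n - 1 + 5 * ((runCount s.toList : Int) - 1)

-- ===== PRECONDITION & SPEC =====
-- Pre_ excludes only the empty string, on which A raises IndexError (s[0]).
def Pre_sc (s : String) : Prop := PySem.Str.len s ≠ 0
instance (s : String) : Decidable (Pre_sc s) := by unfold Pre_sc; infer_instance
def pvWitness_sc : String := "rgb"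
def Spec_sc (s : String) (out : Int) : Prop := out = sc_alt s
instance (s : String) (out : Int) : Decidable (Spec_sc s out) := by unfold Spec_sc; infer_instance

-- ===== CLAIM (what is proved, stated in full; the proofs are below) =====
def Claim_equal_sc : Prop := ∀ (s : String), Dom_sc s → Pre_sc s → Spec_sc s (sc s)

-- ===== LEMMAS AND PROOFS =====

-- Loop invariant for A: the fold from (c, t) adds 2 per char plus 5 per adjacent change in c :: rest.
theorem sc_fold_eq (rest : List Char) (c : Char) (t : Int) :
    (rest.foldl scStep (c, t)).2
      = t + 2 * (rest.length : Int)
          + 5 * (((c :: rest).zip rest).countP (fun p => p.1 != p.2) : Nat) := by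
  induction rest generalizing c t with
  | nil => simp
  | cons d rs ih =>
    simp only [List.foldl_cons, List.zip_cons_cons, List.countP_cons, scStep]
    by_cases h : c = d
    · simp [h, ih d (t + 1 + 1)]
      ring
    · simp only [if_pos (by exact h)]
      rw [ih d (t + 1 + 5 + 1)]
      simp [bne, h]
      ring

-- Bridge: number of runs of c :: l = 1 + number of adjacent color changes in c :: l.
theorem runCount_eq_changes (l : List Char) :
    ∀ c : Char,
      runCount (c :: l) = ((c :: l).zip l).countP (fun p => p.1 != p.2) + 1 := by
  induction l with
  | nil => intro c; simp [runCount]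
  | cons d rs ih =>
    intro c
    by_cases h : c = d
    · subst h
      have h1 : runCount (c :: c :: rs) = runCount (c :: rs) := by
        conv_lhs => rw [runCount]
        rw [runCount]
        simp [List.dropWhile]
      rw [h1, ih c]
      simp [List.zip_cons_cons, bne]
    · have hdc : (d == c) = false := by
        simp only [beq_eq_false_iff_ne]
        exact fun hh => h hh.symm
      have hdrop : (d :: rs).dropWhile (· == c) = d :: rs := by
        simp [List.dropWhile, hdc]
      rw [runCount, hdrop, ih d]
      simp only [List.zip_cons_cons, List.countP_cons]
      simp [bne, h]
      omega

theorem sc_spec' (s : String) (h : Pre_sc s) : sc s = sc_alt s := by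
  unfold sc sc_alt
  have hne : s.toList ≠ [] := by
    intro hl
    exact h (by simp [PySem.Str.len, hl])
  obtain ⟨c, l, hcl⟩ := List.exists_cons_of_ne_nil hne
  have hget : PySem.Str.pyGet? s 0 = some c := by
    simp [PySem.Str.pyGet?, PySem.Chars.pyGet?, PySem.List.pyGet?, PySem.List.pyIdx?, hcl]
  rw [hget]
  simp only [hcl, List.drop_one, List.tail_cons]
  rw [sc_fold_eq, runCount_eq_changes l c]
  simp only [List.length_cons]
  push_cast
  ring

-- ===== VERDICT (by name: the statement is the Claim_ definition above) =====
theorem sc_spec : Claim_equal_sc := by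
  intro s _ hpre
  exact sc_spec' s hpre
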